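-- pv_equiv track=rewrite | github.com/rubenodamo/multimodal-hri | voice/parser.py | _match_longest
-- ===== SOURCE A (Python) =====
-- def _match_longest(text: str, synonyms: dict[str, object]) -> object | None:
--     """
--     Return value for the longest matching key in text.
--
--     Args:
--         text: Normalised input string.
--         synonyms: Mapping of phrases to values.
--
--     Returns:
--         Matched value or None.
--     """
--
--     best_key = None
--     best_len = 0
--
--     for key in synonyms:
--         if key in text and len(key) > best_len:
--             best_key = key
--             best_len = len(key)
--
--     return synonyms[best_key] if best_key is not None else None
-- ===== SOURCE B (Python) =====
-- def _match_longest(text: str, synonyms: dict[str, object]) -> object | None: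
--     """Sort the phrases by length, longest first (stable, so ties keep dict order),
--     then return the value of the first non-empty phrase found in text."""
--     for key in sorted(synonyms, key=len, reverse=True):
--         if key and key in text:
--             return synonyms[key]
--     return None
-- ===== Notes on version B (the rewrite author's own statement) =====
-- stated objective: faster
-- what changed: A scans every key keeping a running best_key/best_len maximum; B stable-sorts the keys by length descending and returns at the FIRST non-empty key occurring in text, so the expensive substring scans stop at the first (longest) hit instead of testing every key.
import Mathlib
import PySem

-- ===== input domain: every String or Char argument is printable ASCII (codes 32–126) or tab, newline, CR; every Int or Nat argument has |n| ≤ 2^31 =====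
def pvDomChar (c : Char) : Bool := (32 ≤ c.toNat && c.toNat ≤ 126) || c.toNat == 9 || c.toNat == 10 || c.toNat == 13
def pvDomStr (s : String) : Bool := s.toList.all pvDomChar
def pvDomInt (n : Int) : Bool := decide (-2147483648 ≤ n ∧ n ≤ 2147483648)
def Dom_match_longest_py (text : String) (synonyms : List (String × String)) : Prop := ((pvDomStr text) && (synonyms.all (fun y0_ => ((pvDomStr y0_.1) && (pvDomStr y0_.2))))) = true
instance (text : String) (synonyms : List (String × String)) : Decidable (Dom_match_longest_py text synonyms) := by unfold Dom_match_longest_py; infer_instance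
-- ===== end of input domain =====

-- B replaces A's single pass with a running best_key/best_len maximum by a different
-- strategy: stable-sort the keys by length descending and return at the FIRST non-empty
-- key that occurs in text (early exit); same results, a sort-then-scan decomposition.

-- ===== PORT A =====
def match_longest_py (text : String) (synonyms : List (String × String)) : Option String :=
  match ((PySem.Dict.ofList synonyms).keys.foldl
    (fun (st : Option String × Int) key =>
      if PySem.Str.isIn key text && decide (st.2 < PySem.Str.len key) then
        (some key, PySem.Str.len key)
      else st)
    (none, 0)).1 with
  | some k => (PySem.Dict.ofList synonyms).get? k
  | none => none

-- ===== PORT B =====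
def match_longest_py_alt (text : String) (synonyms : List (String × String)) : Option String :=
  match (PySem.List.sorted (PySem.Dict.ofList synonyms).keys PySem.Str.len true).find?
      (fun k => decide (k ≠ "") && PySem.Str.isIn k text) with
  | some k => (PySem.Dict.ofList synonyms).get? k
  | none => none

-- ===== PRECONDITION & SPEC =====
def Spec_match_longest_py (text : String) (synonyms : List (String × String)) (out : Option String) : Prop := out = match_longest_py_alt text synonyms
instance (text : String) (synonyms : List (String × String)) (out : Option String) : Decidable (Spec_match_longest_py text synonyms out) := by unfold Spec_match_longest_py; infer_instance

-- ===== CLAIM (what is proved, stated in full; the proofs are below) =====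
def Claim_equal_match_longest_py : Prop := ∀ (text : String) (synonyms : List (String × String)), Dom_match_longest_py text synonyms → Spec_match_longest_py text synonyms (match_longest_py text synonyms)

-- ===== LEMMAS AND PROOFS =====

lemma len_pos_iff_ne_empty (k : String) : 0 < PySem.Str.len k ↔ k ≠ "" := by
  have h : k.toList = [] ↔ k = "" := String.toList_eq_nil_iff
  constructor
  · intro hp he
    rw [he] at hp
    simp [PySem.Str.len] at hp
  · intro hne
    have h1 : k.toList ≠ [] := fun hh => hne (h.mp hh)
    have h2 : 0 < k.toList.length := List.length_pos_iff.mpr h1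
    simpa [PySem.Str.len] using h2

lemma len_nonneg (k : String) : 0 ≤ PySem.Str.len k := by
  simp [PySem.Str.len]

-- One comparison step of max?-by-length, peeled off the front.
lemma maxstep (m x : String) (rest : List String) :
    PySem.List.max? (m :: x :: rest) PySem.Str.len
    = if PySem.Str.len m < PySem.Str.len x then PySem.List.max? (x :: rest) PySem.Str.len
      else PySem.List.max? (m :: rest) PySem.Str.len := by
  by_cases h : PySem.Str.len m < PySem.Str.len x
  · rw [if_pos h]
    show List.foldl _ (if PySem.Str.len m < PySem.Str.len x then some x else some m) rest = _
    rw [if_pos h]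
    rfl
  · rw [if_neg h]
    show List.foldl _ (if PySem.Str.len m < PySem.Str.len x then some x else some m) rest = _
    rw [if_neg h]
    rfl

-- A's tracking fold over the keys, started from a best candidate b (paired with its
-- length), equals max?-by-length over b followed by the filtered keys: an empty key
-- never displaces the best (its length 0 is never strictly greater), which is exactly
-- the non-emptiness test in B's scan.
lemma fold_eq (text : String) :
    ∀ (l : List String) (b : Option String) (s : Int),
    s = (match b with | none => 0 | some m => PySem.Str.len m) →
    (l.foldl (fun (st : Option String × Int) key =>
        if PySem.Str.isIn key text && decide (st.2 < PySem.Str.len key) then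
          (some key, PySem.Str.len key)
        else st)
      (b, s)).1
    = PySem.List.max?
        ((match b with | none => [] | some m => [m])
          ++ l.filter (fun k => decide (k ≠ "") && PySem.Str.isIn k text))
        PySem.Str.len := by
  intro l
  induction l with
  | nil => intro b s hs; subst hs; cases b <;> rfl
  | cons x t ih =>
    intro b s hs
    subst hs
    rw [List.foldl_cons, List.filter_cons]
    cases hin : PySem.Str.isIn x text with
    | false =>
      simp only [Bool.and_false, Bool.false_and, Bool.false_eq_true, if_false]
      exact ih b _ rfl
    | true =>
      simp only [Bool.true_and, Bool.and_true, decide_eq_true_eq]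
      cases b with
      | none =>
        by_cases hne : x = ""
        · subst hne
          rw [if_neg (by simp [PySem.Str.len] : ¬ (0:Int) < PySem.Str.len ""),
              if_neg (by simp : ¬ ("" : String) ≠ "")]
          exact ih none 0 rfl
        · rw [if_pos ((len_pos_iff_ne_empty x).mpr hne), if_pos hne]
          simpa using ih (some x) _ rfl
      | some m =>
        by_cases hne : x = ""
        · subst hne
          rw [if_neg (by have h1 := len_nonneg m
                         have h2 : PySem.Str.len "" = 0 := by simp [PySem.Str.len]
                         omega : ¬ PySem.Str.len m < PySem.Str.len ""),
              if_neg (by simp : ¬ ("" : String) ≠ "")]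
          exact ih (some m) _ rfl
        · rw [if_pos hne]
          simp only [List.cons_append, List.nil_append]
          rw [maxstep]
          by_cases hlt : PySem.Str.len m < PySem.Str.len x
          · rw [if_pos hlt, if_pos hlt]
            simpa using ih (some x) _ rfl
          · rw [if_neg hlt, if_neg hlt]
            simpa using ih (some m) _ rfl

-- insertBy unfolding equations (PySem.List.insertBy reduces on constructors).
lemma insertBy_nil {α : Type} (before : α → α → Bool) (x : α) :
    PySem.List.insertBy before x [] = [x] := rfl

lemma insertBy_cons {α : Type} (before : α → α → Bool) (x y : α) (ys : List α) :
    PySem.List.insertBy before x (y :: ys)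
    = if before x y then x :: y :: ys else y :: PySem.List.insertBy before x ys := rfl

-- Inserting into a descending-by-key list keeps it descending.
lemma pw_insertBy {α : Type} (f : α → Int) (x : α) :
    ∀ acc : List α, acc.Pairwise (fun a b => f b ≤ f a) →
    (PySem.List.insertBy (fun a b => decide (f b < f a)) x acc).Pairwise (fun a b => f b ≤ f a) := by
  intro acc
  induction acc with
  | nil => intro _; simp [insertBy_nil]
  | cons y ys ih =>
    intro h
    rcases List.pairwise_cons.mp h with ⟨hy, hys⟩
    rw [insertBy_cons]
    by_cases hlt : f y < f x
    · rw [if_pos (by simpa using hlt)]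
      refine List.pairwise_cons.mpr ⟨?_, h⟩
      intro b hb
      rcases List.mem_cons.mp hb with hb | hb
      · subst hb; exact le_of_lt hlt
      · exact le_trans (hy b hb) (le_of_lt hlt)
    · rw [if_neg (by simpa using hlt)]
      refine List.pairwise_cons.mpr ⟨?_, ih hys⟩
      intro b hb
      rcases (PySem.List.mem_insertBy _ x b ys).mp hb with hb | hb
      · subst hb; exact le_of_not_gt hlt
      · exact hy b hb

-- The first p-satisfying element after a stable descending insertion of x:
-- x wins exactly when it satisfies p and is strictly longer than the previous winner.
lemma find?_insertBy {α : Type} (f : α → Int) (p : α → Bool) (x : α) :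
    ∀ acc : List α, acc.Pairwise (fun a b => f b ≤ f a) →
    (PySem.List.insertBy (fun a b => decide (f b < f a)) x acc).find? p
    = if p x then
        (match acc.find? p with
         | none => some x
         | some m => if f m < f x then some x else some m)
      else acc.find? p := by
  intro acc
  induction acc with
  | nil =>
    intro _
    rw [insertBy_nil]
    cases hp : p x <;> simp [List.find?, hp]
  | cons y ys ih =>
    intro h
    rcases List.pairwise_cons.mp h with ⟨hy, hys⟩
    rw [insertBy_cons]
    by_cases hlt : f y < f x
    · rw [if_pos (by simpa using hlt)]
      cases hp : p x with
      | true =>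
        cases hfind : List.find? p (y :: ys) with
        | none => simp [hp]
        | some m =>
          have hm : m ∈ y :: ys := List.mem_of_find?_eq_some hfind
          have hmy : f m ≤ f y := by
            rcases List.mem_cons.mp hm with hm | hm
            · subst hm; exact le_refl _
            · exact hy m hm
          have : f m < f x := lt_of_le_of_lt hmy hlt
          simp [hp, this]
      | false => simp [List.find?_cons, hp]
    · rw [if_neg (by simpa using hlt)]
      cases hq : p y with
      | true =>
        cases hp : p x with
        | true => simp [hq, hlt]
        | false => simp [hq]
      | false =>
        have := ih hys
        cases hp : p x with
        | true => simpa [List.find?_cons, hq, hp] using this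
        | false => simpa [List.find?_cons, hq, hp] using this

-- Scanning the stable descending sort for the first match IS the running max over the
-- filtered keys (B's sort-then-scan computes A's running maximum).
lemma fold_sorted {α : Type} (f : α → Int) (p : α → Bool) :
    ∀ (xs L : List α), L.Pairwise (fun a b => f b ≤ f a) →
    (xs.foldl (fun acc x => PySem.List.insertBy (fun a b => decide (f b < f a)) x acc) L).find? p
    = (xs.filter p).foldl
        (fun o x => match o with
          | none => some x
          | some m => if f m < f x then some x else some m)
        (L.find? p) := by
  intro xs
  induction xs with
  | nil => intro L _; rfl
  | cons x t ih =>
    intro L hL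
    rw [List.foldl_cons, List.filter_cons]
    rw [ih _ (pw_insertBy f x L hL)]
    rw [find?_insertBy f p x L hL]
    cases hp : p x with
    | true => simp
    | false => simp

-- ===== VERDICT (by name: the statement is the Claim_ definition above) =====
theorem match_longest_py_spec : Claim_equal_match_longest_py := by
  intro text synonyms _
  show match_longest_py text synonyms = match_longest_py_alt text synonyms
  unfold match_longest_py match_longest_py_alt
  rw [fold_eq text (PySem.Dict.ofList synonyms).keys none 0 rfl, List.nil_append,
      PySem.List.sorted_rev_eq_foldl_insertBy,
      fold_sorted PySem.Str.len (fun k => decide (k ≠ "") && PySem.Str.isIn k text) _ [] List.Pairwise.nil]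
  rfl
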